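-- pv_equiv track=rewrite | github.com/ppotepa/torrent-bot | universal_flags.py | validate_command_flags
-- ===== SOURCE A (Python) =====
-- from typing import Tuple, Dict, List, Any
--
-- def validate_command_flags(flags_list: List[str], command_name: str) -> Tuple[List[str], List[str]]:
--     """
--     Validate flags for a specific command.
--
--     Args:
--         flags_list: List of flags to validate
--         command_name: Command name (t, dl, si, monitor, etc.)
--
--     Returns:
--         Tuple of (valid_flags, errors)
--     """
--
--     # Define valid flags for each command
--     valid_flags_map = {
--         't': ['all', 'rich', 'music', 'notify', 'silent', 'cache', 'nocache'],
--         'torrent': ['all', 'rich', 'music', 'notify', 'silent', 'cache', 'nocache'],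
--         'torrents': ['all', 'rich', 'music', 'notify', 'silent', 'cache', 'nocache'],
--         'dl': ['force', 'notify', 'silent', 'background', 'audio'],
--         'd': ['force', 'notify', 'silent', 'audio'],
--         'si': ['detailed', 'brief', 'cpu', 'memory', 'disk', 'network'],
--         'sysinfo': ['detailed', 'brief', 'cpu', 'memory', 'disk', 'network'],
--         'system_info': ['detailed', 'brief', 'cpu', 'memory', 'disk', 'network'],
--         'monitor': ['start', 'stop', 'status', 'force'],
--         'download_monitor': ['start', 'stop', 'status', 'force'],
--     }
--
--     # Define mutually exclusive flag groups
--     exclusive_groups_map = {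
--         't': [['all', 'rich', 'music'], ['notify', 'silent'], ['cache', 'nocache']],
--         'torrent': [['all', 'rich', 'music'], ['notify', 'silent'], ['cache', 'nocache']],
--         'torrents': [['all', 'rich', 'music'], ['notify', 'silent'], ['cache', 'nocache']],
--         'dl': [['notify', 'silent']],
--         'd': [['notify', 'silent']],
--         'si': [['detailed', 'brief'], ['cpu', 'memory', 'disk', 'network']],
--         'sysinfo': [['detailed', 'brief'], ['cpu', 'memory', 'disk', 'network']],
--         'system_info': [['detailed', 'brief'], ['cpu', 'memory', 'disk', 'network']],
--         'monitor': [['start', 'stop']],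
--         'download_monitor': [['start', 'stop']],
--     }
--
--     valid_flags = valid_flags_map.get(command_name, [])
--     exclusive_groups = exclusive_groups_map.get(command_name, [])
--
--     errors = []
--     validated_flags = []
--
--     # Check if flags are valid
--     for flag in flags_list:
--         if flag not in valid_flags:
--             errors.append(f"Unknown flag '{flag}' for command '{command_name}'")
--         else:
--             validated_flags.append(flag)
--
--     # Check for mutually exclusive flags
--     for group in exclusive_groups:
--         found_in_group = [f for f in validated_flags if f in group]
--         if len(found_in_group) > 1:
--             errors.append(f"Conflicting flags: {', '.join(found_in_group)} are mutually exclusive")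
--
--     return validated_flags, errors
-- ===== SOURCE B (Python) =====
-- # The two per-command tables are replaced by one compact grammar string per command:
-- # tokens separated by spaces are flags; members of a mutually exclusive group are
-- # joined by '/'.  Parsing the grammar yields a flag -> group-index dict (singletons
-- # map to -1) and one empty bucket per group; a single pass over flags_list then
-- # classifies each flag via one dict lookup and files it into its group's bucket,
-- # and conflicts are read off the buckets in group order.
--
-- COMMAND_GRAMMAR = {
--     't': "all/rich/music notify/silent cache/nocache",
--     'torrent': "all/rich/music notify/silent cache/nocache",
--     'torrents': "all/rich/music notify/silent cache/nocache",
--     'dl': "force notify/silent background audio",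
--     'd': "force notify/silent audio",
--     'si': "detailed/brief cpu/memory/disk/network",
--     'sysinfo': "detailed/brief cpu/memory/disk/network",
--     'system_info': "detailed/brief cpu/memory/disk/network",
--     'monitor': "start/stop status force",
--     'download_monitor': "start/stop status force",
-- }
--
-- def validate_command_flags(flags_list, command_name):
--     grammar = COMMAND_GRAMMAR.get(command_name, "")
--     group_of = {}
--     buckets = []
--     for token in grammar.split():
--         if '/' in token:
--             for member in token.split('/'):
--                 group_of[member] = len(buckets)
--             buckets.append([])
--         else:
--             group_of[token] = -1
--
--     validated_flags = []
--     errors = []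
--     for flag in flags_list:
--         g = group_of.get(flag)
--         if g is None:
--             errors.append(f"Unknown flag '{flag}' for command '{command_name}'")
--         else:
--             validated_flags.append(flag)
--             if g >= 0:
--                 buckets[g].append(flag)
--
--     for bucket in buckets:
--         if len(bucket) > 1:
--             errors.append(f"Conflicting flags: {', '.join(bucket)} are mutually exclusive")
--
--     return validated_flags, errors
-- ===== Notes on version B (the rewrite author's own statement) =====
-- stated objective: alternative
-- what changed: The two hard-coded per-command tables are replaced by one compact grammar string per command ('/' joins a mutually exclusive group); parsing it builds a flag->group-index dict plus per-group buckets, so a single dict lookup classifies each flag and conflict errors are read off the buckets, with no per-group re-scan of validated_flags and no membership scans of the flag lists.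
import Mathlib
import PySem

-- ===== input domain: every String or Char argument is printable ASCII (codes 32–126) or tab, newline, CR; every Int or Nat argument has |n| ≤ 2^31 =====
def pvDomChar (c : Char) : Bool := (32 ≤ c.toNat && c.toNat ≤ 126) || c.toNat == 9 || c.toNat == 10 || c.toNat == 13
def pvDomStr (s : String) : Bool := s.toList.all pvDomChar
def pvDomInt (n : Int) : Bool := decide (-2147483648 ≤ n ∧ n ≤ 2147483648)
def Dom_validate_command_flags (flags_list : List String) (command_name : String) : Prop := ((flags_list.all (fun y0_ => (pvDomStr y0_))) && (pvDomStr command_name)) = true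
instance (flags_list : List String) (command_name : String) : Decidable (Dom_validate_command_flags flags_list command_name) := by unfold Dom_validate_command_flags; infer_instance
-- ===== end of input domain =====

-- B replaces the two per-command tables by one compact grammar string per command ('/' joins a
-- mutually exclusive group); parsing it yields a flag -> group-index dict and per-group buckets,
-- so one dict lookup classifies each flag (objective: alternative representation, same cost).

-- ===== PORT A =====
-- shared message builders (both Pythons build these exact f-strings)
def msgUnknown (flag cmd : String) : String :=
  "Unknown flag '" ++ flag ++ "' for command '" ++ cmd ++ "'"

def msgConflict (found : List String) : String :=
  "Conflicting flags: " ++ PySem.Str.join ", " found ++ " are mutually exclusive"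

def valid_flags_map : PySem.Dict String (List String) :=
  PySem.Dict.ofList [
    ("t", ["all", "rich", "music", "notify", "silent", "cache", "nocache"]),
    ("torrent", ["all", "rich", "music", "notify", "silent", "cache", "nocache"]),
    ("torrents", ["all", "rich", "music", "notify", "silent", "cache", "nocache"]),
    ("dl", ["force", "notify", "silent", "background", "audio"]),
    ("d", ["force", "notify", "silent", "audio"]),
    ("si", ["detailed", "brief", "cpu", "memory", "disk", "network"]),
    ("sysinfo", ["detailed", "brief", "cpu", "memory", "disk", "network"]),
    ("system_info", ["detailed", "brief", "cpu", "memory", "disk", "network"]),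
    ("monitor", ["start", "stop", "status", "force"]),
    ("download_monitor", ["start", "stop", "status", "force"])]

def exclusive_groups_map : PySem.Dict String (List (List String)) :=
  PySem.Dict.ofList [
    ("t", [["all", "rich", "music"], ["notify", "silent"], ["cache", "nocache"]]),
    ("torrent", [["all", "rich", "music"], ["notify", "silent"], ["cache", "nocache"]]),
    ("torrents", [["all", "rich", "music"], ["notify", "silent"], ["cache", "nocache"]]),
    ("dl", [["notify", "silent"]]),
    ("d", [["notify", "silent"]]),
    ("si", [["detailed", "brief"], ["cpu", "memory", "disk", "network"]]),
    ("sysinfo", [["detailed", "brief"], ["cpu", "memory", "disk", "network"]]),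
    ("system_info", [["detailed", "brief"], ["cpu", "memory", "disk", "network"]]),
    ("monitor", [["start", "stop"]]),
    ("download_monitor", [["start", "stop"]])]

-- A's body after the two table lookups (both loops, step for step)
def aBody (valid_flags : List String) (exclusive_groups : List (List String))
    (command_name : String) (flags_list : List String) : List String × List String :=
  -- for flag in flags_list: unknown -> errors, else -> validated_flags
  let ev := flags_list.foldl
    (fun (st : List String × List String) flag =>
      if valid_flags.contains flag = false then
        (st.1 ++ [msgUnknown flag command_name], st.2)
      else
        (st.1, st.2 ++ [flag]))
    ([], [])
  let errors := ev.1
  let validated_flags := ev.2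
  -- for group in exclusive_groups: re-scan validated_flags
  let errors := exclusive_groups.foldl
    (fun e group =>
      let found_in_group := validated_flags.filter (fun f => group.contains f)
      if found_in_group.length > 1 then e ++ [msgConflict found_in_group] else e)
    errors
  (validated_flags, errors)

def validate_command_flags (flags_list : List String) (command_name : String) :
    List String × List String :=
  aBody (valid_flags_map.getD command_name []) (exclusive_groups_map.getD command_name [])
    command_name flags_list

-- ===== PORT B =====
def command_grammar : PySem.Dict String String :=
  PySem.Dict.ofList [
    ("t", "all/rich/music notify/silent cache/nocache"),
    ("torrent", "all/rich/music notify/silent cache/nocache"),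
    ("torrents", "all/rich/music notify/silent cache/nocache"),
    ("dl", "force notify/silent background audio"),
    ("d", "force notify/silent audio"),
    ("si", "detailed/brief cpu/memory/disk/network"),
    ("sysinfo", "detailed/brief cpu/memory/disk/network"),
    ("system_info", "detailed/brief cpu/memory/disk/network"),
    ("monitor", "start/stop status force"),
    ("download_monitor", "start/stop status force")]

-- Source B's parsing loop: group_of dict and one empty bucket per '/'-group
def parseGrammar (grammar : String) : PySem.Dict String Int × List (List String) :=
  (PySem.Str.split₀ grammar).foldl
    (fun (st : PySem.Dict String Int × List (List String)) token =>
      if PySem.Str.isIn "/" token then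
        -- token.split('/'): the separator "/" is a nonempty literal, so split? is never none
        (((PySem.Str.split? token "/").getD []).foldl
            (fun d m => d.insert m (st.2.length : Int)) st.1,
         st.2 ++ [[]])
      else
        (st.1.insert token (-1), st.2))
    (PySem.Dict.empty, [])

-- Source B's body after the grammar lookup/parse: one classifying pass, then read the buckets
def bBody (group_of : PySem.Dict String Int) (buckets0 : List (List String))
    (command_name : String) (flags_list : List String) : List String × List String :=
  let st := flags_list.foldl
    (fun (st : List String × List String × List (List String)) flag =>
      match group_of.get? flag with
      | none => (st.1, st.2.1 ++ [msgUnknown flag command_name], st.2.2)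
      | some g =>
        (st.1 ++ [flag], st.2.1,
         -- buckets[g].append(flag): parsing guarantees 0 ≤ g < len(buckets) here,
         -- so .toNat and List.modify are exact for Python's buckets[g]
         if g ≥ 0 then st.2.2.modify g.toNat (fun b => b ++ [flag]) else st.2.2))
    ([], [], buckets0)
  let errors := st.2.2.foldl
    (fun e bucket => if bucket.length > 1 then e ++ [msgConflict bucket] else e)
    st.2.1
  (st.1, errors)

def validate_command_flags_alt (flags_list : List String) (command_name : String) :
    List String × List String :=
  let pg := parseGrammar (command_grammar.getD command_name "")
  bBody pg.1 pg.2 command_name flags_list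

-- ===== PRECONDITION & SPEC =====
def Spec_validate_command_flags (flags_list : List String) (command_name : String) (out : List String × List String) : Prop := out = validate_command_flags_alt flags_list command_name
instance (flags_list : List String) (command_name : String) (out : List String × List String) : Decidable (Spec_validate_command_flags flags_list command_name out) := by unfold Spec_validate_command_flags; infer_instance

-- ===== CLAIM (what is proved, stated in full; the proofs are below) =====
def Claim_equal_validate_command_flags : Prop := ∀ (flags_list : List String) (command_name : String), Dom_validate_command_flags flags_list command_name → Spec_validate_command_flags flags_list command_name (validate_command_flags flags_list command_name)

-- ===== LEMMAS AND PROOFS =====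

-- A's first loop collects errors and validated flags
theorem aLoop (valid : List String) (cmd : String) (fl : List String) :
    ∀ (e v : List String),
    fl.foldl
      (fun (st : List String × List String) flag =>
        if valid.contains flag = false then
          (st.1 ++ [msgUnknown flag cmd], st.2)
        else
          (st.1, st.2 ++ [flag]))
      (e, v)
    = (e ++ (fl.filter (fun x => !valid.contains x)).map (fun x => msgUnknown x cmd),
       v ++ fl.filter (fun x => valid.contains x)) := by
  induction fl with
  | nil => simp
  | cons a t ih =>
    intro e v
    simp only [List.foldl_cons]
    by_cases h : a ∈ valid
    · rw [if_neg (by simp [List.contains_eq_mem, h]), ih]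
      simp [List.contains_eq_mem, h]
    · rw [if_pos (by simp [List.contains_eq_mem, h]), ih]
      simp [List.contains_eq_mem, h]

-- B's classifying pass: validated flags, unknown errors, and per-group buckets
theorem bLoop (gof : PySem.Dict String Int) (cmd : String)
    (hrange : ∀ p ∈ gof.items, 0 ≤ p.2 → p.2.toNat < L)
    (fl : List String) :
    ∀ (v e : List String) (bs : List (List String)), bs.length = L →
    fl.foldl
      (fun (st : List String × List String × List (List String)) flag =>
        match gof.get? flag with
        | none => (st.1, st.2.1 ++ [msgUnknown flag cmd], st.2.2)
        | some g =>
          (st.1 ++ [flag], st.2.1,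
           if g ≥ 0 then st.2.2.modify g.toNat (fun b => b ++ [flag]) else st.2.2))
      (v, e, bs)
    = (v ++ fl.filter (fun f => (gof.get? f).isSome),
       e ++ (fl.filter (fun f => !(gof.get? f).isSome)).map (fun f => msgUnknown f cmd),
       bs.mapIdx (fun j b => b ++ fl.filter (fun f => gof.get? f == some (j : Int)))) := by
  induction fl with
  | nil =>
    intro v e bs _
    refine congrArg₂ Prod.mk (by simp) (congrArg₂ Prod.mk (by simp) ?_)
    apply List.ext_getElem (by simp)
    intro j h1 h2
    simp [List.getElem_mapIdx]
  | cons a t ih =>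
    intro v e bs hlen
    cases hget : gof.get? a with
    | none =>
      simp only [List.foldl_cons, hget]
      rw [ih _ _ _ hlen]
      simp [hget]
    | some g =>
      by_cases hg : 0 ≤ g
      · have hmem := PySem.Dict.mem_items_of_get?_eq_some gof hget
        have hlt : g.toNat < L := hrange _ hmem hg
        simp only [List.foldl_cons, hget, ge_iff_le, hg, if_pos]
        rw [ih _ _ _ (by simp [hlen])]
        refine congrArg₂ Prod.mk (by simp [hget]) (congrArg₂ Prod.mk ?_ ?_)
        · simp [hget]
        · apply List.ext_getElem (by simp)
          intro j h1 h2
          simp only [List.getElem_mapIdx, List.getElem_modify]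
          by_cases hj : g.toNat = j
          · have hgj : (some g == some (j : Int)) = true := by
              simp only [beq_iff_eq, Option.some.injEq]; omega
            simp [hj, hget, hgj]
          · have hgj : (some g == some (j : Int)) = false := by
              simp only [beq_eq_false_iff_ne, ne_eq, Option.some.injEq]; omega
            simp [hj, hget, hgj]
      · simp only [List.foldl_cons, hget, ge_iff_le, hg, if_neg, not_false_iff]
        rw [ih _ _ _ hlen]
        have hgj : ∀ j : Nat, (some g == some (j : Int)) = false := by
          intro j
          simp only [beq_eq_false_iff_ne, ne_eq, Option.some.injEq]; omega
        refine congrArg₂ Prod.mk (by simp [hget]) (congrArg₂ Prod.mk ?_ ?_)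
        · simp [hget]
        · apply List.ext_getElem (by simp)
          intro j h1 h2
          simp [List.getElem_mapIdx, hget, hgj]

-- the master equivalence: A's tables and B's parsed grammar describe the same validation problem
theorem bodiesAgree (valid : List String) (groups : List (List String))
    (gof : PySem.Dict String Int) (cmd : String)
    (hkv : ∀ f ∈ valid, gof.contains f = true)
    (hvk : ∀ p ∈ gof.items, p.1 ∈ valid)
    (hgr : ∀ p ∈ gof.items, ∀ j : Nat, (h : j < groups.length) → (p.2 = (j : Int) ↔ p.1 ∈ groups[j]))
    (hrange : ∀ p ∈ gof.items, 0 ≤ p.2 → p.2.toNat < groups.length)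
    (fl : List String) :
    aBody valid groups cmd fl = bBody gof (groups.map (fun _ => [])) cmd fl := by
  have hcv : ∀ f, (gof.get? f).isSome = valid.contains f := by
    intro f
    by_cases hf : f ∈ valid
    · have h := hkv f hf
      rw [PySem.Dict.contains_eq_isSome_get?] at h
      simp [h, List.contains_eq_mem, hf]
    · cases hg : gof.get? f with
      | none => simp [List.contains_eq_mem, hf]
      | some g =>
        exact absurd (hvk _ (PySem.Dict.mem_items_of_get?_eq_some gof hg)) hf
  have hpt : ∀ (j : Nat), (h : j < groups.length) → ∀ f,
      (gof.get? f == some (j : Int)) = (groups[j].contains f && valid.contains f) := by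
    intro j h f
    cases hg : gof.get? f with
    | none =>
      have hc := hcv f
      rw [hg] at hc
      have hnv : f ∉ valid := by simpa [List.contains_eq_mem] using hc.symm
      simp [List.contains_eq_mem, hnv]
    | some g =>
      have hm := PySem.Dict.mem_items_of_get?_eq_some gof hg
      have hv : f ∈ valid := hvk _ hm
      have hiff := hgr _ hm j h
      by_cases hgj : g = (j : Int)
      · simp [List.contains_eq_mem, hv, hgj, hiff.mp hgj]
      · have hnm : f ∉ groups[j] := fun hmf => hgj (hiff.mpr hmf)
        simp [List.contains_eq_mem, hv, hgj, hnm]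
  unfold aBody bBody
  simp only []
  rw [aLoop, bLoop gof cmd hrange fl [] [] _ (by simp)]
  simp only [List.nil_append]
  have hval : fl.filter (fun f => (gof.get? f).isSome) = fl.filter (fun x => valid.contains x) :=
    List.filter_congr (fun x _ => hcv x)
  have herr : fl.filter (fun f => !(gof.get? f).isSome) = fl.filter (fun x => !valid.contains x) :=
    List.filter_congr (fun x _ => by rw [hcv x])
  have hbk : (groups.map (fun _ => ([] : List String))).mapIdx
        (fun j b => b ++ fl.filter (fun f => gof.get? f == some (j : Int)))
      = groups.map (fun gp =>
          (fl.filter (fun x => valid.contains x)).filter (fun f => gp.contains f)) := by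
    apply List.ext_getElem (by simp)
    intro j h1 h2
    have hj : j < groups.length := by simpa using h1
    simp only [List.getElem_mapIdx, List.getElem_map, List.nil_append, List.filter_filter]
    exact List.filter_congr (fun x _ => hpt j hj x)
  rw [hval, herr, hbk, List.foldl_map]

-- getD falls back to the default for a command name that is not one of the ten keys
theorem getD_default_of_ne {ν : Type} (d : PySem.Dict String ν) (dflt : ν) (cmd : String)
    (hk : d.keys = ["t", "torrent", "torrents", "dl", "d", "si", "sysinfo", "system_info",
      "monitor", "download_monitor"])
    (h1 : cmd ≠ "t") (h2 : cmd ≠ "torrent") (h3 : cmd ≠ "torrents") (h4 : cmd ≠ "dl")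
    (h5 : cmd ≠ "d") (h6 : cmd ≠ "si") (h7 : cmd ≠ "sysinfo") (h8 : cmd ≠ "system_info")
    (h9 : cmd ≠ "monitor") (h10 : cmd ≠ "download_monitor") : d.getD cmd dflt = dflt := by
  have hn : d.get? cmd = none := by
    rw [PySem.Dict.get?_eq_none_iff_not_mem_keys, hk]
    simp [h1, h2, h3, h4, h5, h6, h7, h8, h9, h10]
  rw [PySem.Dict.getD_eq_get?_getD, hn]
  rfl

-- one named command: its parsed grammar and its two A-tables satisfy bodiesAgree's hypotheses
theorem caseCmd (cmd : String) (fl : List String)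
    (hb : (parseGrammar (command_grammar.getD cmd "")).2
      = (exclusive_groups_map.getD cmd []).map (fun _ => ([] : List String)))
    (hkv : ∀ f ∈ (valid_flags_map.getD cmd []),
      (parseGrammar (command_grammar.getD cmd "")).1.contains f = true)
    (hvk : ∀ p ∈ (parseGrammar (command_grammar.getD cmd "")).1.items,
      p.1 ∈ (valid_flags_map.getD cmd []))
    (hgr : ∀ p ∈ (parseGrammar (command_grammar.getD cmd "")).1.items,
      ∀ j : Nat, (h : j < (exclusive_groups_map.getD cmd []).length) →
        (p.2 = (j : Int) ↔ p.1 ∈ (exclusive_groups_map.getD cmd [])[j]))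
    (hrange : ∀ p ∈ (parseGrammar (command_grammar.getD cmd "")).1.items,
      0 ≤ p.2 → p.2.toNat < (exclusive_groups_map.getD cmd []).length) :
    validate_command_flags fl cmd = validate_command_flags_alt fl cmd := by
  simp only [validate_command_flags, validate_command_flags_alt]
  rw [hb]
  exact bodiesAgree _ _ _ _ hkv hvk hgr hrange fl

-- ===== VERDICT (by name: the statement is the Claim_ definition above) =====
set_option maxHeartbeats 2000000 in
theorem validate_command_flags_spec : Claim_equal_validate_command_flags := by
  intro fl cmd _
  unfold Spec_validate_command_flags
  by_cases h1 : cmd = "t"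
  · subst h1; exact caseCmd _ fl (by decide) (by decide) (by decide) (by decide) (by decide)
  by_cases h2 : cmd = "torrent"
  · subst h2; exact caseCmd _ fl (by decide) (by decide) (by decide) (by decide) (by decide)
  by_cases h3 : cmd = "torrents"
  · subst h3; exact caseCmd _ fl (by decide) (by decide) (by decide) (by decide) (by decide)
  by_cases h4 : cmd = "dl"
  · subst h4; exact caseCmd _ fl (by decide) (by decide) (by decide) (by decide) (by decide)
  by_cases h5 : cmd = "d"
  · subst h5; exact caseCmd _ fl (by decide) (by decide) (by decide) (by decide) (by decide)
  by_cases h6 : cmd = "si"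
  · subst h6; exact caseCmd _ fl (by decide) (by decide) (by decide) (by decide) (by decide)
  by_cases h7 : cmd = "sysinfo"
  · subst h7; exact caseCmd _ fl (by decide) (by decide) (by decide) (by decide) (by decide)
  by_cases h8 : cmd = "system_info"
  · subst h8; exact caseCmd _ fl (by decide) (by decide) (by decide) (by decide) (by decide)
  by_cases h9 : cmd = "monitor"
  · subst h9; exact caseCmd _ fl (by decide) (by decide) (by decide) (by decide) (by decide)
  by_cases h10 : cmd = "download_monitor"
  · subst h10; exact caseCmd _ fl (by decide) (by decide) (by decide) (by decide) (by decide)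
  · have e1 : valid_flags_map.getD cmd [] = [] :=
      getD_default_of_ne _ _ _ (by decide) h1 h2 h3 h4 h5 h6 h7 h8 h9 h10
    have e2 : exclusive_groups_map.getD cmd [] = [] :=
      getD_default_of_ne _ _ _ (by decide) h1 h2 h3 h4 h5 h6 h7 h8 h9 h10
    have e3 : command_grammar.getD cmd "" = "" :=
      getD_default_of_ne _ _ _ (by decide) h1 h2 h3 h4 h5 h6 h7 h8 h9 h10
    simp only [validate_command_flags, validate_command_flags_alt]
    rw [e1, e2, e3]
    exact bodiesAgree [] [] (parseGrammar "").1 cmd (by decide) (by decide) (by decide) (by decide) fl
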